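-- pv_equiv track=rewrite | github.com/kkarthik-enphase/Mask2Former | notebooks/train_mask2former.py | _decompress_rle
-- ===== SOURCE A (Python) =====
-- def _decompress_rle(s: str, n: int):
--     """Decompress COCO compressed RLE string to list of counts."""
--     counts = []
--     m = 0
--     p = 0
--     while p < len(s):
--         x = 0
--         k = 0
--         more = True
--         while more:
--             c = ord(s[p]) - 48
--             p += 1
--             more = c > 31
--             x |= (c & 0x1f) << (5 * k)
--             k += 1
--         if x & 1:
--             x = ~x
--         x >>= 1
--         if len(counts) > 0:
--             x += counts[-1] + (1 if len(counts) % 2 == 0 else 0)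
--             # actually just accumulate
--         counts.append(x)
--     # rebuild absolute counts
--     return counts
-- ===== SOURCE B (Python) =====
-- def _decompress_rle(s: str, n: int):
--     """Decompress COCO compressed RLE string: two passes, varint decode then accumulate."""
--     # pass 1: decode zigzag varints into raw deltas (single for-loop over chars)
--     deltas = []
--     x = 0
--     k = 0
--     for ch in s:
--         v = ord(ch) - 48
--         x |= (v & 0x1f) << (5 * k)
--         k += 1
--         if v <= 31:
--             if x & 1:
--                 x = ~x
--             deltas.append(x >> 1)
--             x = 0
--             k = 0
--     # pass 2: accumulate deltas into counts
--     counts = []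
--     for i, d in enumerate(deltas):
--         if i == 0:
--             counts.append(d)
--         else:
--             counts.append(d + counts[-1] + (1 if i % 2 == 0 else 0))
--     return counts
-- ===== Notes on version B (the rewrite author's own statement) =====
-- stated objective: alternative
-- what changed: A interleaves varint parsing and accumulation in one nested while-loop with an explicit position pointer; B makes two separate passes: a single for-loop over the characters that emits a list of zigzag-decoded deltas, then an indexed accumulation pass over that list.
import Mathlib
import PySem

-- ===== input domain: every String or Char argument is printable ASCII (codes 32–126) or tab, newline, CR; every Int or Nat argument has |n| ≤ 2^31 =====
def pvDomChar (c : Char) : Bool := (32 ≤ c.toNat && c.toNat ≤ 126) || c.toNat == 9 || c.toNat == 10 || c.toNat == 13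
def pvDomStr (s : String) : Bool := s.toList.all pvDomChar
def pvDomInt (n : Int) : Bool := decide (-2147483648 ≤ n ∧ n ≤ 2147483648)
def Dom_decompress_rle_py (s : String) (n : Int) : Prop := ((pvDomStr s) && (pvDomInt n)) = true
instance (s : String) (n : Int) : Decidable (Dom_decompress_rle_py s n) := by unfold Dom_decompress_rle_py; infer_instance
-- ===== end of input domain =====

-- B replaces A's interleaved pointer+nested-while loop by two separate passes (varint-decode to deltas, then accumulate); alternative decomposition, same cost.


-- ===== PORT A =====
-- A's inner `while more` loop: consumes chars from position p onward, returns (x, remaining chars).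
-- On [] Python raises IndexError (s[p] out of range); that input is excluded by Pre_ below.
def pvParseA : List Char → Int → Nat → (Int × List Char)
  | [], x, _ => (x, [])
  | c :: rest, x, k =>
    let cv : Int := (c.toNat : Int) - 48
    let x' := PySem.Int.bor x ((PySem.Int.band cv 31) <<< (5 * k))
    if cv > 31 then pvParseA rest x' (k + 1) else (x', rest)

theorem pvParseA_len : ∀ (cs : List Char) (c : Char) (x : Int) (k : Nat),
    (pvParseA (c :: cs) x k).2.length ≤ cs.length := by
  intro cs
  induction cs with
  | nil => intro c x k; simp only [pvParseA]; split <;> simp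
  | cons c2 cs' ih =>
    intro c x k
    simp only [pvParseA]
    split
    · exact le_trans (ih c2 _ _) (Nat.le_succ _)
    · simp

-- A's outer `while p < len(s)` loop, carrying the growing counts list.
def pvLoopA (cs : List Char) (counts : List Int) : List Int :=
  match cs with
  | [] => counts
  | c :: rest =>
    let P := pvParseA (c :: rest) 0 0
    let x1 := if PySem.Int.band P.1 1 ≠ 0 then Int.not P.1 else P.1
    let x2 := x1 >>> (1 : Nat)
    let x3 := if counts.length > 0 then
        x2 + (counts.getLastD 0 + (if counts.length % 2 == 0 then (1 : Int) else 0))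
      else x2
    pvLoopA P.2 (counts ++ [x3])
termination_by cs.length
decreasing_by
  exact Nat.lt_succ_of_le (pvParseA_len rest c 0 0)

def decompress_rle_py (s : String) (n : Int) : List Int :=
  pvLoopA s.toList []

-- ===== PORT B =====
-- pass 1 of Source B: single for-loop over the characters, emitting zigzag-decoded deltas.
def pvDeltasB : List Char → Int → Nat → List Int
  | [], _, _ => []
  | c :: rest, x, k =>
    let v : Int := (c.toNat : Int) - 48
    let x' := PySem.Int.bor x ((PySem.Int.band v 31) <<< (5 * k))
    if v ≤ 31 then
      ((if PySem.Int.band x' 1 ≠ 0 then Int.not x' else x') >>> (1 : Nat)) :: pvDeltasB rest 0 0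
    else
      pvDeltasB rest x' (k + 1)

-- pass 2 of Source B: indexed accumulation (prev carries counts[-1]).
def pvAccumB : List Int → Nat → Int → List Int
  | [], _, _ => []
  | d :: ds, i, prev =>
    let c := if i == 0 then d else d + prev + (if i % 2 == 0 then (1 : Int) else 0)
    c :: pvAccumB ds (i + 1) c

def decompress_rle_py_alt (s : String) (n : Int) : List Int :=
  pvAccumB (pvDeltasB s.toList 0 0) 0 0

-- ===== PRECONDITION & SPEC =====
-- Pre_ excludes exactly the strings on which A raises IndexError: a nonempty string whose last
-- character is a continuation byte (ord > 79), so the final varint is unterminated.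
def Pre_decompress_rle_py (s : String) (n : Int) : Prop :=
  (s.toList.getLastD '0').toNat ≤ 79
instance (s : String) (n : Int) : Decidable (Pre_decompress_rle_py s n) := by
  unfold Pre_decompress_rle_py; infer_instance

def pvWitness_decompress_rle_py : String × Int := ("_b=8", 0)

def Spec_decompress_rle_py (s : String) (n : Int) (out : List Int) : Prop :=
  out = decompress_rle_py_alt s n
instance (s : String) (n : Int) (out : List Int) : Decidable (Spec_decompress_rle_py s n out) := by
  unfold Spec_decompress_rle_py; infer_instance

-- ===== CLAIM (what is proved, stated in full; the proofs are below) =====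
def Claim_equal_decompress_rle_py : Prop := ∀ (s : String) (n : Int), Dom_decompress_rle_py s n → Pre_decompress_rle_py s n → Spec_decompress_rle_py s n (decompress_rle_py s n)

-- ===== LEMMAS AND PROOFS =====

-- "well-formed tail": the last character (if any) terminates its varint
def pvWF (cs : List Char) : Prop := (cs.getLastD '0').toNat ≤ 79

theorem pvGetLastD_irrel : ∀ (l : List Char) (a b : Char), l ≠ [] → l.getLastD a = l.getLastD b := by
  intro l
  induction l with
  | nil => intro a b h; exact absurd rfl h
  | cons r rs ih =>
    intro a b _
    simp only [List.getLastD_cons]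

theorem pvWF_tail (c : Char) (rest : List Char) (h : pvWF (c :: rest)) : pvWF rest := by
  cases rest with
  | nil => unfold pvWF; decide
  | cons r rs =>
    unfold pvWF at h ⊢
    rw [List.getLastD_cons] at h
    rw [pvGetLastD_irrel (r :: rs) '0' c (by simp)]
    exact h

theorem pvStep : ∀ (cs : List Char) (x : Int) (k : Nat), cs ≠ [] → pvWF cs →
    pvDeltasB cs x k =
      ((if PySem.Int.band (pvParseA cs x k).1 1 ≠ 0 then Int.not (pvParseA cs x k).1
        else (pvParseA cs x k).1) >>> (1 : Nat)) :: pvDeltasB (pvParseA cs x k).2 0 0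
    ∧ pvWF (pvParseA cs x k).2 := by
  intro cs
  induction cs with
  | nil => intro x k h; exact absurd rfl h
  | cons c rest ih =>
    intro x k _ hwf
    by_cases hc : ((c.toNat : Int) - 48) ≤ 31
    · have hng : ¬ ((c.toNat : Int) - 48) > 31 := by omega
      constructor
      · simp only [pvDeltasB, pvParseA, if_pos hc, if_neg hng]
      · simp only [pvParseA, if_neg hng]
        exact pvWF_tail c rest hwf
    · have hg : ((c.toNat : Int) - 48) > 31 := by omega
      have hrest : rest ≠ [] := by
        intro hr
        subst hr
        unfold pvWF at hwf
        simp at hwf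
        omega
      have hwfr : pvWF rest := pvWF_tail c rest hwf
      have := ih (PySem.Int.bor x ((PySem.Int.band ((c.toNat : Int) - 48) 31) <<< (5 * k))) (k + 1) hrest hwfr
      constructor
      · simp only [pvDeltasB, pvParseA, if_pos hg, if_neg hc]
        exact this.1
      · simp only [pvParseA, if_pos hg]
        exact this.2

theorem pvGetLastD_concat (l : List Int) (a : Int) : (l ++ [a]).getLastD 0 = a := by
  induction l with
  | nil => rfl
  | cons x xs ih =>
    cases xs with
    | nil => rfl
    | cons y ys => simpa [List.getLastD_cons] using ih

theorem pvMain : ∀ (N : Nat) (cs : List Char) (counts : List Int), cs.length ≤ N → pvWF cs →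
    pvLoopA cs counts = counts ++ pvAccumB (pvDeltasB cs 0 0) counts.length (counts.getLastD 0) := by
  intro N
  induction N with
  | zero =>
    intro cs counts hlen _
    have : cs = [] := List.eq_nil_of_length_eq_zero (Nat.le_zero.mp hlen)
    subst this
    simp [pvLoopA, pvDeltasB, pvAccumB]
  | succ N ih =>
    intro cs counts hlen hwf
    cases cs with
    | nil => simp [pvLoopA, pvDeltasB, pvAccumB]
    | cons c rest =>
      obtain ⟨hd, hwf2⟩ := pvStep (c :: rest) 0 0 (by simp) hwf
      set P := pvParseA (c :: rest) 0 0 with hP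
      set z : Int := (if PySem.Int.band P.1 1 ≠ 0 then Int.not P.1 else P.1) >>> (1 : Nat) with hz
      set x3 : Int := if counts.length > 0 then
          z + (counts.getLastD 0 + (if counts.length % 2 == 0 then (1 : Int) else 0))
        else z with hx3
      have hlhs : pvLoopA (c :: rest) counts = pvLoopA P.2 (counts ++ [x3]) := by
        rw [pvLoopA]
      have hlen2 : P.2.length ≤ N := le_trans (pvParseA_len rest c 0 0) (by simpa using hlen)
      rw [hlhs, ih P.2 (counts ++ [x3]) hlen2 hwf2, hd]
      simp only [pvAccumB]
      have hc0 : (if counts.length == 0 then z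
          else z + counts.getLastD 0 + (if counts.length % 2 == 0 then (1 : Int) else 0)) = x3 := by
        rw [hx3]
        by_cases h0 : counts.length = 0
        · simp [h0]
        · have h1 : counts.length > 0 := Nat.pos_of_ne_zero h0
          rw [if_pos h1, if_neg (by simp [h0])]
          split <;> ring
      rw [hc0, pvGetLastD_concat]
      simp [List.append_assoc]

-- ===== VERDICT (by name: the statement is the Claim_ definition above) =====
theorem decompress_rle_py_spec : Claim_equal_decompress_rle_py := by
  unfold Claim_equal_decompress_rle_py
  intro s n _ hpre
  unfold Spec_decompress_rle_py decompress_rle_py decompress_rle_py_alt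
  have := pvMain s.toList.length s.toList [] (le_refl _) hpre
  simpa using this
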